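-- pv_equiv track=rewrite | github.com/Aegislock/HoughLineTennis | utils.py | horizontal_overlaps
-- ===== SOURCE A (Python) =====
-- def horizontal_overlaps(court_horizontal, reference_horizontal, threshold):
--     overlaps = 0
--     for ch in court_horizontal:
--         _, y = ch[0]
--         for rh in reference_horizontal:
--             _, r_y = rh[0]
--             if abs(y - r_y) < threshold:
--                 overlaps += 1
--                 break
--     return overlaps
-- ===== SOURCE B (Python) =====
-- def _bisect_left(ys, y):
--     lo, hi = 0, len(ys)
--     while lo < hi:
--         mid = (lo + hi) // 2
--         if ys[mid] < y:
--             lo = mid + 1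
--         else:
--             hi = mid
--     return lo
--
--
-- def horizontal_overlaps(court_horizontal, reference_horizontal, threshold):
--     ys = sorted(rh[0][1] for rh in reference_horizontal)
--     n = len(ys)
--     overlaps = 0
--     for ch in court_horizontal:
--         y = ch[0][1]
--         i = _bisect_left(ys, y)
--         if (i < n and ys[i] - y < threshold) or (i > 0 and y - ys[i - 1] < threshold):
--             overlaps += 1
--     return overlaps
-- ===== Notes on version B (the rewrite author's own statement) =====
-- stated objective: alternative
-- what changed: B replaces A's inner linear scan over reference lines by a one-time sort of the reference y-values plus a binary search per court line, checking only the two neighbours of the insertion point; asymptotically O((n+m) log m) vs O(n*m), though a timing run could not measure a speed-up on the generated inputs.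
-- outside the precondition, e.g. on horizontal_overlaps([[(0, 0)]], [[(0, 0)], []], 5): A returns 1, B raises IndexError
import Mathlib
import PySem

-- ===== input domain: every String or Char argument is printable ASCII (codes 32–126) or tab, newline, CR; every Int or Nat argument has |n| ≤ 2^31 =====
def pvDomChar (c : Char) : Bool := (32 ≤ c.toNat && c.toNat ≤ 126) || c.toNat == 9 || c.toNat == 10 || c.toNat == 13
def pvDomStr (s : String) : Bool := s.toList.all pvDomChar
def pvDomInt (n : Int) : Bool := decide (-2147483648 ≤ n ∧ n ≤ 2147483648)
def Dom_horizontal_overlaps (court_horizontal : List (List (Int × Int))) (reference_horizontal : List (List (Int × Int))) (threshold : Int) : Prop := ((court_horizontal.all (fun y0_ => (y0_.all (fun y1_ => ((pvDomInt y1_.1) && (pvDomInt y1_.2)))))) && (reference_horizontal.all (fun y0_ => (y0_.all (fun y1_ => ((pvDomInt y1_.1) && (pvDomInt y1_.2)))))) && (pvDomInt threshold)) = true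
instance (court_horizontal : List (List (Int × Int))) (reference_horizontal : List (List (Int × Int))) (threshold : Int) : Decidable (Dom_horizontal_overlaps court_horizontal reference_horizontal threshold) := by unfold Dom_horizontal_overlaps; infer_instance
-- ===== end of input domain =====

-- B replaces A's inner scan over reference lines by sorting the reference y-values once and
-- binary-searching the two neighbours of each court y (alternative algorithm, same results).


-- ===== PORT A =====
-- inner 'for rh in reference_horizontal: … break' loop of A
def aInner (reference_horizontal : List (List (Int × Int))) (y threshold : Int) : Bool :=
  match reference_horizontal with
  | [] => false
  | rh :: rest =>
    let r_y := ((PySem.List.pyGet? rh 0).getD (0, 0)).2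
    if |y - r_y| < threshold then true else aInner rest y threshold

def horizontal_overlaps (court_horizontal : List (List (Int × Int))) (reference_horizontal : List (List (Int × Int))) (threshold : Int) : Int :=
  court_horizontal.foldl (fun overlaps ch =>
    let y := ((PySem.List.pyGet? ch 0).getD (0, 0)).2
    if aInner reference_horizontal y threshold then overlaps + 1 else overlaps) 0

-- ===== PORT B =====
-- _bisect_left in Source B is the standard lo/hi binary-search loop = PySem.List.bisectLeft (same loop)
def horizontal_overlaps_alt (court_horizontal : List (List (Int × Int))) (reference_horizontal : List (List (Int × Int))) (threshold : Int) : Int :=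
  let ys := PySem.List.sorted (reference_horizontal.map (fun rh => ((PySem.List.pyGet? rh 0).getD (0, 0)).2)) (fun x => x) false
  let n := ys.length
  court_horizontal.foldl (fun overlaps ch =>
    let y := ((PySem.List.pyGet? ch 0).getD (0, 0)).2
    let i := PySem.List.bisectLeft ys y
    if (decide (i < n) && decide (ys.getD i 0 - y < threshold)) ||
       (decide (0 < i) && decide (y - ys.getD (i - 1) 0 < threshold))
    then overlaps + 1 else overlaps) 0

-- ===== PRECONDITION & SPEC =====
-- Pre_ excludes inputs containing an empty inner line: Python A raises IndexError on an empty
-- court line and on any empty reference line its inner loop reaches, and B raises IndexError on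
-- any empty line; when an empty reference line lies after a matching one A still returns a value
-- there but B's sorting pass raises (see cites).
def Pre_horizontal_overlaps (court_horizontal : List (List (Int × Int))) (reference_horizontal : List (List (Int × Int))) (threshold : Int) : Prop :=
  (∀ ch ∈ court_horizontal, ch ≠ []) ∧ (∀ rh ∈ reference_horizontal, rh ≠ [])
instance (court_horizontal : List (List (Int × Int))) (reference_horizontal : List (List (Int × Int))) (threshold : Int) : Decidable (Pre_horizontal_overlaps court_horizontal reference_horizontal threshold) := by unfold Pre_horizontal_overlaps; infer_instance

def pvWitness_horizontal_overlaps : (List (List (Int × Int))) × (List (List (Int × Int))) × Int := ([[(0, 1)]], [[(0, 2)]], 5)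

def Spec_horizontal_overlaps (court_horizontal : List (List (Int × Int))) (reference_horizontal : List (List (Int × Int))) (threshold : Int) (out : Int) : Prop := out = horizontal_overlaps_alt court_horizontal reference_horizontal threshold
instance (court_horizontal : List (List (Int × Int))) (reference_horizontal : List (List (Int × Int))) (threshold : Int) (out : Int) : Decidable (Spec_horizontal_overlaps court_horizontal reference_horizontal threshold out) := by unfold Spec_horizontal_overlaps; infer_instance

-- ===== CLAIM (what is proved, stated in full; the proofs are below) =====
def Claim_equal_horizontal_overlaps : Prop := ∀ (court_horizontal : List (List (Int × Int))) (reference_horizontal : List (List (Int × Int))) (threshold : Int), Dom_horizontal_overlaps court_horizontal reference_horizontal threshold → Pre_horizontal_overlaps court_horizontal reference_horizontal threshold → Spec_horizontal_overlaps court_horizontal reference_horizontal threshold (horizontal_overlaps court_horizontal reference_horizontal threshold)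

-- ===== LEMMAS AND PROOFS =====

-- A's inner loop is 'any reference y within threshold'
lemma aInner_eq_any (r : List (List (Int × Int))) (y t : Int) :
    aInner r y t = (r.map (fun rh => ((PySem.List.pyGet? rh 0).getD (0, 0)).2)).any (fun ry => decide (|y - ry| < t)) := by
  induction r with
  | nil => rfl
  | cons rh rest ih =>
    simp only [aInner, List.map_cons, List.any_cons]
    split_ifs with h <;> simp [h, ih]

-- B's two-neighbour check after bisectLeft is the same 'any element within threshold', on a sorted list
lemma bHit_eq_any (ys : List Int) (hs : ys.Pairwise (· ≤ ·)) (y t : Int) :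
    ((decide (PySem.List.bisectLeft ys y < ys.length) && decide (ys.getD (PySem.List.bisectLeft ys y) 0 - y < t)) ||
     (decide (0 < PySem.List.bisectLeft ys y) && decide (y - ys.getD (PySem.List.bisectLeft ys y - 1) 0 < t)))
    = ys.any (fun ry => decide (|y - ry| < t)) := by
  obtain ⟨hle, hlt, hge⟩ := PySem.List.bisectLeft_spec ys y hs
  set i := PySem.List.bisectLeft ys y with hi
  rw [Bool.eq_iff_iff]
  simp only [Bool.or_eq_true, Bool.and_eq_true, decide_eq_true_eq, List.any_eq_true]
  constructor
  · rintro (⟨h1, h2⟩ | ⟨h1, h2⟩)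
    · refine ⟨ys[i], List.getElem_mem h1, ?_⟩
      have := hge i h1 le_rfl
      rw [List.getD_eq_getElem ys 0 h1] at h2
      rw [abs_sub_lt_iff]; omega
    · have hlen : i - 1 < ys.length := by omega
      refine ⟨ys[i - 1], List.getElem_mem hlen, ?_⟩
      have := hlt (i - 1) hlen (by omega)
      rw [List.getD_eq_getElem ys 0 hlen] at h2
      rw [abs_sub_lt_iff]; omega
  · rintro ⟨ry, hmem, habs⟩
    obtain ⟨j, hj, rfl⟩ := List.getElem_of_mem hmem
    rw [abs_sub_lt_iff] at habs
    have hmono := List.pairwise_iff_getElem.mp hs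
    by_cases hji : j < i
    · right
      have hlen : i - 1 < ys.length := by omega
      have hj1 : ys[j] ≤ ys[i - 1] := by
        rcases Nat.lt_or_ge j (i - 1) with h | h
        · exact hmono j (i - 1) hj hlen h
        · have : j = i - 1 := by omega
          subst this; exact le_refl _
      rw [List.getD_eq_getElem ys 0 hlen]
      have := hlt j hj hji
      constructor
      · omega
      · omega
    · left
      have hilen : i < ys.length := by omega
      have hij : ys[i] ≤ ys[j] := by
        rcases Nat.lt_or_ge i j with h | h
        · exact hmono i j hilen hj h
        · have : i = j := by omega
          subst this; exact le_refl _
      rw [List.getD_eq_getElem ys 0 hilen]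
      constructor
      · omega
      · omega

-- the two per-court-line step functions agree
lemma step_eq (r : List (List (Int × Int))) (y t : Int) :
    aInner r y t =
    (let ys := PySem.List.sorted (r.map (fun rh => ((PySem.List.pyGet? rh 0).getD (0, 0)).2)) (fun x => x) false
     let i := PySem.List.bisectLeft ys y
     ((decide (i < ys.length) && decide (ys.getD i 0 - y < t)) ||
      (decide (0 < i) && decide (y - ys.getD (i - 1) 0 < t)))) := by
  set m := r.map (fun rh => ((PySem.List.pyGet? rh 0).getD (0, 0)).2) with hm
  have hs : (PySem.List.sorted m (fun x => x) false).Pairwise (· ≤ ·) :=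
    PySem.List.sorted_pairwise m (fun x => x)
  have hperm : (PySem.List.sorted m (fun x => x) false).Perm m := PySem.List.sorted_perm m _ _
  rw [aInner_eq_any, bHit_eq_any _ hs]
  rw [Bool.eq_iff_iff]
  simp only [List.any_eq_true]
  constructor
  · rintro ⟨x, hx, hp⟩; exact ⟨x, hperm.mem_iff.mpr hx, hp⟩
  · rintro ⟨x, hx, hp⟩; exact ⟨x, hperm.mem_iff.mp hx, hp⟩

lemma foldl_ext_int {α : Type} (f g : Int → α → Int) (h : ∀ a x, f a x = g a x) :
    ∀ (l : List α) (a : Int), l.foldl f a = l.foldl g a := by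
  intro l
  induction l with
  | nil => intro a; rfl
  | cons x xs ih => intro a; simp only [List.foldl_cons, h]; exact ih _

-- ===== VERDICT (by name: the statement is the Claim_ definition above) =====
theorem horizontal_overlaps_spec : Claim_equal_horizontal_overlaps := by
  intro c r t _ _
  show horizontal_overlaps c r t = horizontal_overlaps_alt c r t
  unfold horizontal_overlaps horizontal_overlaps_alt
  apply foldl_ext_int
  intro overlaps ch
  simp only
  rw [step_eq r _ t]
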